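-- pv_equiv track=rewrite | github.com/ConvLab/ConvLab-3 | convlab/base_models/t5/mdst/utils.py | get_state_update
-- ===== SOURCE A (Python) =====
-- from copy import deepcopy
--
-- def get_state_update(prev_state, cur_state):
--     # T_t = B_t - B_{t-1}
--     state = deepcopy(cur_state)
--     for domain in prev_state:
--         state.setdefault(domain, {})
--         for slot in prev_state[domain]:
--             if slot not in state[domain]:
--                 # deletion
--                 state[domain][slot] = ''
--             elif prev_state[domain][slot] == state[domain][slot]:
--                 # carry-over
--                 state[domain].pop(slot)
--         if len(state[domain]) == 0:
--             state.pop(domain)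
--     return state
-- ===== SOURCE B (Python) =====
-- def get_state_update(prev_state, cur_state):
--     # T_t = B_t - B_{t-1}, built from scratch instead of pruning a deepcopy
--     update = {}
--     for domain, cur_slots in cur_state.items():
--         prev_slots = prev_state.get(domain)
--         if prev_slots is None:
--             # brand-new domain: take it over wholesale (copied)
--             update[domain] = dict(cur_slots)
--             continue
--         diff = {slot: value for slot, value in cur_slots.items()
--                 if prev_slots.get(slot) != value}
--         for slot in prev_slots:
--             if slot not in cur_slots:
--                 diff[slot] = ''
--         if diff:
--             update[domain] = diff
--     for domain, prev_slots in prev_state.items():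
--         if domain not in cur_state and prev_slots:
--             update[domain] = {slot: '' for slot in prev_slots}
--     return update
-- ===== Notes on version B (the rewrite author's own statement) =====
-- stated objective: alternative
-- what changed: Instead of deepcopying cur_state and destructively pruning it (setdefault/pop on a mutated copy), B builds the update dict from scratch: one pass over cur_state emitting per-domain diff dicts (new domains copied wholesale, changed slots kept, deleted slots marked ''), then one pass over prev_state appending deletion-only domains.
import Mathlib
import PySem

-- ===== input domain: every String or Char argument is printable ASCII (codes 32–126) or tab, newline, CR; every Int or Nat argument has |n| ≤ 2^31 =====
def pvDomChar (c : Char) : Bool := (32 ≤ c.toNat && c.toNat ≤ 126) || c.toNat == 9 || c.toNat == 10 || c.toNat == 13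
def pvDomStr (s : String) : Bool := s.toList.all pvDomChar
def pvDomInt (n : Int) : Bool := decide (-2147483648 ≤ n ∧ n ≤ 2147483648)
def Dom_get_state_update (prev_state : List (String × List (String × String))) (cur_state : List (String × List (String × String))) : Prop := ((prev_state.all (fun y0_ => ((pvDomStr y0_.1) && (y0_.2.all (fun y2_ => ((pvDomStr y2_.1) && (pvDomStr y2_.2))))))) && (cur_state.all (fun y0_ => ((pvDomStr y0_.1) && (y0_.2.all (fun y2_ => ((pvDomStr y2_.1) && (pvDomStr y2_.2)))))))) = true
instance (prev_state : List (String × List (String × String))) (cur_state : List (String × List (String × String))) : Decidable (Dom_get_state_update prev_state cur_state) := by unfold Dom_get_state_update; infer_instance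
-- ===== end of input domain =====

-- B rebuilds the state-update dict from scratch in two passes (over cur_state, then prev_state)
-- instead of A's deepcopy-and-prune of cur_state; same return value (alternative decomposition, no speed claim).

-- ===== PORT A =====
def get_state_update (prev_state : List (String × List (String × String))) (cur_state : List (String × List (String × String))) : List (String × List (String × String)) :=
  let prevD : PySem.Dict String (PySem.Dict String String) :=
    PySem.Dict.mk (prev_state.map (fun p => (p.1, PySem.Dict.mk p.2)))
  let curD : PySem.Dict String (PySem.Dict String String) :=
    PySem.Dict.mk (cur_state.map (fun p => (p.1, PySem.Dict.mk p.2)))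
  -- state = deepcopy(cur_state); for domain in prev_state: …
  let state := prevD.items.foldl (fun state dp =>
    let state := state.setdefault dp.1 PySem.Dict.empty
    -- for slot in prev_state[domain]: mutate state[domain] in place
    let d := dp.2.items.foldl (fun d sp =>
      if d.contains sp.1 = false then d.insert sp.1 ""
      else if d.get? sp.1 == some sp.2 then d.erase sp.1
      else d) (state.getD dp.1 PySem.Dict.empty)
    let state := state.insert dp.1 d
    if d.size == 0 then state.erase dp.1 else state) curD
  state.items.map (fun p => (p.1, p.2.items))

-- ===== PORT B =====
-- B-side helper: the body of B's first loop (one domain of cur_state)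
def pvBstep1 (prevD : PySem.Dict String (PySem.Dict String String)) (upd : PySem.Dict String (PySem.Dict String String)) (dc : String × PySem.Dict String String) : PySem.Dict String (PySem.Dict String String) :=
  match prevD.get? dc.1 with
  | none => upd.insert dc.1 dc.2
  | some ps =>
    let diff := dc.2.items.foldl (fun d sv =>
      if !(ps.get? sv.1 == some sv.2) then d.insert sv.1 sv.2 else d) PySem.Dict.empty
    let diff := ps.items.foldl (fun d p =>
      if dc.2.contains p.1 = false then d.insert p.1 "" else d) diff
    if diff.size == 0 then upd else upd.insert dc.1 diff

def get_state_update_alt (prev_state : List (String × List (String × String))) (cur_state : List (String × List (String × String))) : List (String × List (String × String)) :=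
  let prevD : PySem.Dict String (PySem.Dict String String) :=
    PySem.Dict.mk (prev_state.map (fun p => (p.1, PySem.Dict.mk p.2)))
  let curD : PySem.Dict String (PySem.Dict String String) :=
    PySem.Dict.mk (cur_state.map (fun p => (p.1, PySem.Dict.mk p.2)))
  -- first pass: over cur_state
  let upd := curD.items.foldl (pvBstep1 prevD) PySem.Dict.empty
  -- second pass: deletion-only domains from prev_state
  let upd := prevD.items.foldl (fun upd (dp : String × PySem.Dict String String) =>
    if dp.2.size ≠ 0 ∧ curD.contains dp.1 = false then
      upd.insert dp.1 (dp.2.items.foldl (fun d p => d.insert p.1 "") PySem.Dict.empty)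
    else upd) upd
  upd.items.map (fun p => (p.1, p.2.items))

-- ===== PRECONDITION & SPEC =====
-- Pre_ excludes association lists with duplicate keys (at the domain or the slot level): those
-- do not represent any Python dict[str, dict[str, str]], and both parameters of A are dicts.
def Pre_get_state_update (prev_state : List (String × List (String × String))) (cur_state : List (String × List (String × String))) : Prop :=
  ((prev_state.map (fun p => p.1)).Nodup ∧ ∀ p ∈ prev_state, (p.2.map (fun q => q.1)).Nodup) ∧
  ((cur_state.map (fun p => p.1)).Nodup ∧ ∀ p ∈ cur_state, (p.2.map (fun q => q.1)).Nodup)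
instance (prev_state : List (String × List (String × String))) (cur_state : List (String × List (String × String))) : Decidable (Pre_get_state_update prev_state cur_state) := by unfold Pre_get_state_update; infer_instance

def pvWitness_get_state_update : (List (String × List (String × String))) × (List (String × List (String × String))) :=
  ([("hotel", [("area", "west"), ("stars", "4")])],
   [("hotel", [("area", "east")]), ("taxi", [("dest", "cambridge")])])

def Spec_get_state_update (prev_state : List (String × List (String × String))) (cur_state : List (String × List (String × String))) (out : List (String × List (String × String))) : Prop := out = get_state_update_alt prev_state cur_state
instance (prev_state : List (String × List (String × String))) (cur_state : List (String × List (String × String))) (out : List (String × List (String × String))) : Decidable (Spec_get_state_update prev_state cur_state out) := by unfold Spec_get_state_update; infer_instance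

-- ===== CLAIM (what is proved, stated in full; the proofs are below) =====
def Claim_equal_get_state_update : Prop := ∀ (prev_state : List (String × List (String × String))) (cur_state : List (String × List (String × String))), Dom_get_state_update prev_state cur_state → Pre_get_state_update prev_state cur_state → Spec_get_state_update prev_state cur_state (get_state_update prev_state cur_state)

-- ===== LEMMAS AND PROOFS =====

-- the per-domain diff both programs compute, as an items list
def pvDiff (ps cs : PySem.Dict String String) : List (String × String) :=
  cs.items.filter (fun sv => !(ps.get? sv.1 == some sv.2)) ++
  (ps.items.filter (fun p => !(cs.contains p.1))).map (fun p => (p.1, ("" : String)))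

-- what both programs do with a domain of cur_state
def pvG (P : PySem.Dict String (PySem.Dict String String)) (dc : String × PySem.Dict String String) : Option (String × PySem.Dict String String) :=
  match P.get? dc.1 with
  | none => some dc
  | some ps => if (pvDiff ps dc.2).isEmpty then none else some (dc.1, PySem.Dict.mk (pvDiff ps dc.2))

-- what both programs do with a domain of prev_state that is absent from cur_state
def pvH (C : PySem.Dict String (PySem.Dict String String)) (dp : String × PySem.Dict String String) : Option (String × PySem.Dict String String) :=
  if C.contains dp.1 = false ∧ dp.2.items ≠ [] then
    some (dp.1, PySem.Dict.mk (dp.2.items.map (fun p => (p.1, ("" : String)))))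
  else none

-- "insert the kept pair" step, shared by the proofs about B's two passes
def pvIns {A B : Type} (F : String × A → Option (String × B)) (u : PySem.Dict String B) (x : String × A) : PySem.Dict String B :=
  match F x with
  | none => u
  | some y => u.insert y.1 y.2

-- A's outer loop body, named for the proofs
def pvAstepFn (state : PySem.Dict String (PySem.Dict String String)) (dp : String × PySem.Dict String String) : PySem.Dict String (PySem.Dict String String) :=
  let state := state.setdefault dp.1 PySem.Dict.empty
  let d := dp.2.items.foldl (fun d sp =>
    if d.contains sp.1 = false then d.insert sp.1 ""
    else if d.get? sp.1 == some sp.2 then d.erase sp.1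
    else d) (state.getD dp.1 PySem.Dict.empty)
  let state := state.insert dp.1 d
  if d.size == 0 then state.erase dp.1 else state

lemma pvKeyMem {ν : Type} (l : List (String × ν)) (x : String × ν) (hx : x ∈ l) :
    x.1 ∈ l.map (fun p => p.1) := List.mem_map.mpr ⟨x, hx, rfl⟩

lemma pvKeysNodup_mk {ν : Type} (l : List (String × ν)) (h : (l.map (fun p => p.1)).Nodup) :
    (PySem.Dict.mk l).keys.Nodup := by
  rw [PySem.Dict.keys_mk]; exact h

lemma pvGet?_mk_eq_none {ν : Type} (l : List (String × ν)) (k : String) (h : k ∉ l.map (fun p => p.1)) :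
    (PySem.Dict.mk l).get? k = none := by
  simp only [PySem.Dict.get?, Option.map_eq_none_iff, List.find?_eq_none]
  intro x hx
  simp only [beq_iff_eq]
  intro he
  exact h (he ▸ pvKeyMem l x hx)

lemma pvContains_of_mem {ν : Type} (d : PySem.Dict String ν) (x : String × ν) (hx : x ∈ d.items) :
    d.contains x.1 = true := by
  simp only [PySem.Dict.contains, List.any_eq_true]
  exact ⟨x, hx, by simp⟩

lemma pvContains_erase_of_ne {ν : Type} (d : PySem.Dict String ν) (s x : String) (h : x ≠ s) :
    (d.erase s).contains x = d.contains x := by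
  simp only [PySem.Dict.erase, PySem.Dict.contains]
  apply Bool.eq_iff_iff.mpr
  simp only [List.any_eq_true]
  constructor
  · rintro ⟨p, hp, hpx⟩
    exact ⟨p, (List.mem_filter.mp hp).1, hpx⟩
  · rintro ⟨p, hp, hpx⟩
    refine ⟨p, List.mem_filter.mpr ⟨hp, ?_⟩, hpx⟩
    have hx : p.1 = x := by simpa using hpx
    simp [hx, h]

lemma pvNodup_keys_erase {ν : Type} (d : PySem.Dict String ν) (s : String) (h : d.keys.Nodup) :
    (d.erase s).keys.Nodup := by
  simp only [PySem.Dict.erase, PySem.Dict.keys] at *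
  exact (List.filter_sublist.map _).nodup h

lemma pvNe_of_not_contains {ν : Type} (d : PySem.Dict String ν) (k : String) (h : d.contains k = false)
    (x : String × ν) (hx : x ∈ d.items) : x.1 ≠ k := by
  intro he
  have hc := pvContains_of_mem d x hx
  rw [he, h] at hc
  exact Bool.noConfusion hc

lemma pvErase_of_not_contains {ν : Type} (d : PySem.Dict String ν) (k : String) (h : d.contains k = false) :
    d.erase k = d := by
  apply PySem.Dict.ext
  show d.items.filter (fun p => !(p.1 == k)) = d.items
  rw [List.filter_eq_self]
  intro x hx
  simp [pvNe_of_not_contains d k h x hx]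

lemma pvInsert_erase {ν : Type} (C : PySem.Dict String ν) (dom : String) (d : ν) :
    (C.insert dom d).erase dom = C.erase dom := by
  by_cases hc : C.contains dom = true
  · apply PySem.Dict.ext
    show ((C.insert dom d).items).filter (fun p => !(p.1 == dom)) = C.items.filter (fun p => !(p.1 == dom))
    rw [PySem.Dict.items_insert_of_contains C d hc, List.filter_map]
    have h1 : ∀ x ∈ C.items, ((fun (p : String × ν) => !(p.1 == dom)) ∘ (fun p => if (p.1 == dom) = true then (dom, d) else p)) x = (fun (p : String × ν) => !(p.1 == dom)) x := by
      intro x _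
      by_cases hx : (x.1 == dom) = true <;> simp [Function.comp, hx]
    rw [List.filter_congr h1]
    have h2 : ∀ x ∈ C.items.filter (fun (p : String × ν) => !(p.1 == dom)), (fun p => if (p.1 == dom) = true then (dom, d) else p) x = x := by
      intro x hx
      have hh := (List.mem_filter.mp hx).2
      simp only [Bool.not_eq_true'] at hh
      simp [hh]
    rw [List.map_congr_left h2]
    simp
  · have hcf : C.contains dom = false := by simpa using hc
    apply PySem.Dict.ext
    show ((C.insert dom d).items).filter (fun p => !(p.1 == dom)) = C.items.filter (fun p => !(p.1 == dom))
    rw [PySem.Dict.items_insert_of_not_contains C d hcf, List.filter_append]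
    simp

lemma pvFilterMap_filter {α β : Type} (p : α → Bool) (g : α → Option β) (l : List α) :
    (l.filter p).filterMap g = l.filterMap (fun x => if p x then g x else none) := by
  induction l with
  | nil => simp
  | cons x tl ih =>
    by_cases hx : p x = true
    · cases hg : g x <;> simp [hx, hg, ih]
    · have hx' : p x = false := by simpa using hx
      simp [hx', ih]

lemma pvG_key (P : PySem.Dict String (PySem.Dict String String)) (x y : String × PySem.Dict String String)
    (h : pvG P x = some y) : y.1 = x.1 := by
  unfold pvG at h
  split at h
  · exact (congrArg Prod.fst (Option.some.inj h)).symm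
  · split at h
    · simp at h
    · exact (congrArg Prod.fst (Option.some.inj h)).symm

lemma pvH_key (C : PySem.Dict String (PySem.Dict String String)) (x y : String × PySem.Dict String String)
    (h : pvH C x = some y) : y.1 = x.1 := by
  unfold pvH at h
  split at h
  · exact (congrArg Prod.fst (Option.some.inj h)).symm
  · simp at h

lemma pvG_congr_of_ne (tlP : List (String × PySem.Dict String String)) (dom : String) (ps : PySem.Dict String String)
    (x : String × PySem.Dict String String) (hx : x.1 ≠ dom) :
    pvG (PySem.Dict.mk ((dom, ps) :: tlP)) x = pvG (PySem.Dict.mk tlP) x := by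
  unfold pvG
  rw [PySem.Dict.get?_mk_cons]
  have hne : (dom == x.1) = false := by simpa using (Ne.symm hx)
  rw [hne]
  simp

lemma pvH_congr (C C' : PySem.Dict String (PySem.Dict String String)) (x : String × PySem.Dict String String)
    (h : C'.contains x.1 = C.contains x.1) : pvH C' x = pvH C x := by
  unfold pvH
  rw [h]

lemma pvG_none (P : PySem.Dict String (PySem.Dict String String)) (dc : String × PySem.Dict String String)
    (h : P.get? dc.1 = none) : pvG P dc = some dc := by
  unfold pvG; rw [h]

lemma pvG_some (P : PySem.Dict String (PySem.Dict String String)) (dc : String × PySem.Dict String String)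
    (ps : PySem.Dict String String) (h : P.get? dc.1 = some ps) :
    pvG P dc = if (pvDiff ps dc.2).isEmpty then none else some (dc.1, PySem.Dict.mk (pvDiff ps dc.2)) := by
  unfold pvG; rw [h]

lemma pvDiff_nodup (ps cs : PySem.Dict String String) (hps : ps.keys.Nodup) (hcs : cs.keys.Nodup) :
    ((pvDiff ps cs).map (fun p => p.1)).Nodup := by
  unfold pvDiff
  rw [List.map_append]
  apply List.Nodup.append
  · exact (List.filter_sublist.map _).nodup hcs
  · rw [List.map_map]
    have he : ((fun (p : String × String) => p.1) ∘ (fun (p : String × String) => (p.1, ("" : String)))) = fun (p : String × String) => p.1 := rfl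
    rw [he]
    exact (List.filter_sublist.map _).nodup hps
  · intro a ha hb
    have ha' : cs.contains a = true := by
      obtain ⟨q, hq, hqa⟩ := List.mem_map.mp ha
      have hc := pvContains_of_mem cs q (List.mem_of_mem_filter hq)
      rwa [hqa] at hc
    have hb' : cs.contains a = false := by
      rw [List.map_map] at hb
      obtain ⟨r, hr, hra⟩ := List.mem_map.mp hb
      have h2 := (List.mem_filter.mp hr).2
      have h4 : cs.contains r.1 = false := by simpa using h2
      have h5 : ((fun (p : String × String) => p.1) ∘ fun (p : String × String) => (p.1, ("" : String))) r = r.1 := rfl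
      rw [h5] at hra
      rwa [hra] at h4
    rw [ha'] at hb'
    exact Bool.noConfusion hb'

-- A's inner loop over prev_state[domain] computes pvDiff
lemma pvA_inner (ps : List (String × String)) (d : PySem.Dict String String)
    (hps : (ps.map (fun p => p.1)).Nodup) (hd : d.keys.Nodup) :
    (ps.foldl (fun d sp =>
      if d.contains sp.1 = false then d.insert sp.1 ""
      else if d.get? sp.1 == some sp.2 then d.erase sp.1
      else d) d) = PySem.Dict.mk (pvDiff (PySem.Dict.mk ps) d) := by
  induction ps generalizing d with
  | nil =>
    apply PySem.Dict.ext
    show d.items = pvDiff (PySem.Dict.mk []) d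
    unfold pvDiff
    have h0 : ∀ x : String, (PySem.Dict.mk ([] : List (String × String))).get? x = none := fun _ => rfl
    have h1 : ∀ v : String, ((none : Option String) == some v) = false := fun _ => rfl
    simp [h0, h1]
  | cons sp tl ih =>
    obtain ⟨s, pv⟩ := sp
    rw [List.map_cons, List.nodup_cons] at hps
    obtain ⟨hs, htl⟩ := hps
    rw [List.foldl_cons]
    by_cases hc : d.contains s = true
    · rw [if_neg (by simp [hc])]
      by_cases hv : (d.get? s == some pv) = true
      · -- carry-over: erase s
        rw [if_pos hv, ih (d.erase s) htl (pvNodup_keys_erase d s hd)]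
        apply PySem.Dict.ext
        show pvDiff (PySem.Dict.mk tl) (d.erase s) = pvDiff (PySem.Dict.mk ((s, pv) :: tl)) d
        unfold pvDiff
        congr 1
        · show ((d.items.filter (fun p => !(p.1 == s))).filter _) = _
          rw [List.filter_filter]
          apply List.filter_congr
          intro x hx
          by_cases hxs : x.1 = s
          · have hx2 : d.get? s = some x.2 := by
              have hg := PySem.Dict.get?_of_mem_items d (k := x.1) (v := x.2) (by simpa using hx) hd
              rwa [hxs] at hg
            have hpv : x.2 = pv := by
              rw [hx2] at hv
              simpa using hv
            rw [PySem.Dict.get?_mk_cons]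
            simp [hxs, hpv]
          · rw [PySem.Dict.get?_mk_cons]
            have hne : (s == x.1) = false := by simpa using (Ne.symm hxs)
            have hne2 : (x.1 == s) = false := by simpa using hxs
            rw [hne]
            simp [hne2]
        · show ((tl.filter (fun p => !((d.erase s).contains p.1))).map _) = (((s, pv) :: tl).filter (fun p => !(d.contains p.1))).map _
          rw [List.filter_cons]
          rw [if_neg (by simp [hc])]
          congr 1
          apply List.filter_congr
          intro x hx
          have hxs : x.1 ≠ s := by
            intro he
            exact hs (he ▸ pvKeyMem tl x hx)
          rw [pvContains_erase_of_ne d s x.1 hxs]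
      · -- conflicting value: keep
        rw [if_neg hv, ih d htl hd]
        apply PySem.Dict.ext
        show pvDiff (PySem.Dict.mk tl) d = pvDiff (PySem.Dict.mk ((s, pv) :: tl)) d
        unfold pvDiff
        congr 1
        · apply List.filter_congr
          intro x hx
          by_cases hxs : x.1 = s
          · have hx2 : d.get? s = some x.2 := by
              have hg := PySem.Dict.get?_of_mem_items d (k := x.1) (v := x.2) (by simpa using hx) hd
              rwa [hxs] at hg
            have hxpv : ¬ (x.2 = pv) := by
              intro he
              rw [hx2, he] at hv
              simp at hv
            have h1 : (PySem.Dict.mk tl).get? x.1 = none := by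
              apply pvGet?_mk_eq_none
              rw [hxs]; exact hs
            rw [h1, PySem.Dict.get?_mk_cons]
            have h2 : ((none : Option String) == some x.2) = false := rfl
            simp [hxs, h2, Ne.symm hxpv]
          · rw [PySem.Dict.get?_mk_cons]
            have hne : (s == x.1) = false := by simpa using (Ne.symm hxs)
            rw [hne]
            simp
        · rw [List.filter_cons, if_neg (by simp [hc])]
    · -- deletion marker: insert s ''
      have hcf : d.contains s = false := by simpa using hc
      rw [if_pos hcf, ih (d.insert s "") htl (PySem.Dict.nodup_keys_insert d s "" hd)]
      apply PySem.Dict.ext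
      show pvDiff (PySem.Dict.mk tl) (d.insert s "") = pvDiff (PySem.Dict.mk ((s, pv) :: tl)) d
      unfold pvDiff
      rw [PySem.Dict.items_insert_of_not_contains d "" hcf, List.filter_append]
      have h1 : ([(s, ("" : String))].filter (fun sv => !((PySem.Dict.mk tl).get? sv.1 == some sv.2))) = [(s, ("" : String))] := by
        have h2 : (PySem.Dict.mk tl).get? s = none := pvGet?_mk_eq_none tl s hs
        simp [h2]
      rw [h1]
      have h3 : d.items.filter (fun sv => !((PySem.Dict.mk tl).get? sv.1 == some sv.2))
              = d.items.filter (fun sv => !((PySem.Dict.mk ((s, pv) :: tl)).get? sv.1 == some sv.2)) := by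
        apply List.filter_congr
        intro x hx
        have hxs : x.1 ≠ s := pvNe_of_not_contains d s hcf x hx
        rw [PySem.Dict.get?_mk_cons]
        have hne : (s == x.1) = false := by simpa using (Ne.symm hxs)
        rw [hne]
        simp
      have h4 : tl.filter (fun p => !((d.insert s "").contains p.1)) = tl.filter (fun p => !(d.contains p.1)) := by
        apply List.filter_congr
        intro x hx
        have hxs : x.1 ≠ s := by
          intro he
          exact hs (he ▸ pvKeyMem tl x hx)
        rw [PySem.Dict.contains_insert d s x.1 ""]
        have hne : (x.1 == s) = false := by simpa using hxs
        rw [hne]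
        simp
      rw [h3, h4, List.filter_cons, if_pos (by simp [hcf])]
      simp [List.append_assoc]

-- A's outer loop, characterised
lemma pvA_outer (pl : List (String × PySem.Dict String String)) (C : PySem.Dict String (PySem.Dict String String))
    (hpl : (pl.map (fun p => p.1)).Nodup) (hplv : ∀ p ∈ pl, p.2.keys.Nodup)
    (hC : C.keys.Nodup) (hCv : ∀ p ∈ C.items, p.2.keys.Nodup) :
    (pl.foldl pvAstepFn C).items = C.items.filterMap (pvG (PySem.Dict.mk pl)) ++ pl.filterMap (pvH C) := by
  induction pl generalizing C with
  | nil =>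
    rw [List.foldl_nil, List.filterMap_nil, List.append_nil]
    have h0 : ∀ x ∈ C.items, pvG (PySem.Dict.mk []) x = some x := by
      intro x _
      exact pvG_none (PySem.Dict.mk []) x (pvGet?_mk_eq_none [] x.1 (by simp))
    rw [List.filterMap_congr h0, List.filterMap_some]
  | cons dp tl ih =>
    obtain ⟨dom, ps⟩ := dp
    rw [List.map_cons, List.nodup_cons] at hpl
    obtain ⟨hdomtl, htl⟩ := hpl
    have hpsn : ps.keys.Nodup := hplv _ List.mem_cons_self
    have hplv' : ∀ p ∈ tl, p.2.keys.Nodup := fun p hp => hplv p (List.mem_cons_of_mem _ hp)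
    rw [List.foldl_cons]
    cases hcg : C.get? dom with
    | some cs =>
      have hc : C.contains dom = true := by
        cases hcc : C.contains dom
        · rw [(PySem.Dict.get?_eq_none_iff_contains C dom).mpr hcc] at hcg; simp at hcg
        · rfl
      have hmem : (dom, cs) ∈ C.items := PySem.Dict.mem_items_of_get?_eq_some C hcg
      have hcsn : cs.keys.Nodup := hCv _ hmem
      have hstep : pvAstepFn C (dom, ps) =
          (if (pvDiff ps cs).isEmpty then C.erase dom
           else C.insert dom (PySem.Dict.mk (pvDiff ps cs))) := by
        unfold pvAstepFn
        simp only [PySem.Dict.setdefault_of_contains C _ hc]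
        have hgetD : C.getD dom PySem.Dict.empty = cs := by simp [PySem.Dict.getD, hcg]
        rw [hgetD, pvA_inner ps.items cs hpsn hcsn]
        have hsz : ((PySem.Dict.mk (pvDiff (PySem.Dict.mk ps.items) cs)).size == 0) = (pvDiff ps cs).isEmpty := by
          show ((pvDiff ps cs).length == 0) = (pvDiff ps cs).isEmpty
          cases pvDiff ps cs <;> rfl
        rw [hsz]
        by_cases hz : (pvDiff ps cs).isEmpty = true
        · rw [if_pos hz, if_pos hz, pvInsert_erase]
        · rw [if_neg hz, if_neg hz]
      rw [hstep]
      by_cases hz : (pvDiff ps cs).isEmpty = true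
      · rw [if_pos hz]
        rw [ih (C.erase dom) htl hplv' (pvNodup_keys_erase C dom hC)
            (fun p hp => hCv p (List.mem_of_mem_filter hp))]
        have hHd : pvH C (dom, ps) = none := by
          unfold pvH
          rw [if_neg (by simp [hc])]
        rw [List.filterMap_cons_none hHd]
        congr 1
        · show (C.items.filter (fun p => !(p.1 == dom))).filterMap (pvG (PySem.Dict.mk tl)) = _
          rw [pvFilterMap_filter]
          apply List.filterMap_congr
          intro x hx
          by_cases hxs : x.1 = dom
          · have hx2 : x.2 = cs := by
              have hg := PySem.Dict.get?_of_mem_items C (k := x.1) (v := x.2) (by simpa using hx) hC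
              rw [hxs, hcg] at hg
              exact (Option.some.inj hg).symm
            rw [if_neg (by simp [hxs])]
            rw [pvG_some _ x ps (by rw [PySem.Dict.get?_mk_cons]; simp [hxs]), hx2, if_pos hz]
          · rw [if_pos (by simp [hxs]), pvG_congr_of_ne tl dom ps x hxs]
        · apply List.filterMap_congr
          intro x hx
          apply pvH_congr
          apply pvContains_erase_of_ne
          intro he
          exact hdomtl (he ▸ pvKeyMem tl x hx)
      · rw [if_neg hz]
        have hCv' : ∀ p ∈ (C.insert dom (PySem.Dict.mk (pvDiff ps cs))).items, p.2.keys.Nodup := by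
          intro p hp
          rcases (PySem.Dict.mem_items_insert _ _ _ _).mp hp with h | ⟨h, _⟩
          · rw [h]
            show ((pvDiff ps cs).map (fun x => x.1)).Nodup
            exact pvDiff_nodup ps cs hpsn hcsn
          · exact hCv p h
        rw [ih (C.insert dom (PySem.Dict.mk (pvDiff ps cs))) htl hplv'
            (PySem.Dict.nodup_keys_insert _ _ _ hC) hCv']
        have hHd : pvH C (dom, ps) = none := by
          unfold pvH
          rw [if_neg (by simp [hc])]
        rw [List.filterMap_cons_none hHd]
        congr 1
        · rw [PySem.Dict.items_insert_of_contains C _ hc, List.filterMap_map]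
          apply List.filterMap_congr
          intro x hx
          by_cases hxs : x.1 = dom
          · have hx2 : x.2 = cs := by
              have hg := PySem.Dict.get?_of_mem_items C (k := x.1) (v := x.2) (by simpa using hx) hC
              rw [hxs, hcg] at hg
              exact (Option.some.inj hg).symm
            have hfx : ((fun (p : String × PySem.Dict String String) => if (p.1 == dom) = true then (dom, PySem.Dict.mk (pvDiff ps cs)) else p) x) = (dom, PySem.Dict.mk (pvDiff ps cs)) := by
              simp [hxs]
            show pvG (PySem.Dict.mk tl) ((fun (p : String × PySem.Dict String String) => if (p.1 == dom) = true then (dom, PySem.Dict.mk (pvDiff ps cs)) else p) x) = _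
            rw [hfx]
            rw [pvG_none (PySem.Dict.mk tl) (dom, PySem.Dict.mk (pvDiff ps cs)) (pvGet?_mk_eq_none tl dom hdomtl)]
            rw [pvG_some _ x ps (by rw [PySem.Dict.get?_mk_cons]; simp [hxs]), hx2, if_neg hz, hxs]
          · have hfx : ((fun (p : String × PySem.Dict String String) => if (p.1 == dom) = true then (dom, PySem.Dict.mk (pvDiff ps cs)) else p) x) = x := by
              simp [hxs]
            show pvG (PySem.Dict.mk tl) ((fun (p : String × PySem.Dict String String) => if (p.1 == dom) = true then (dom, PySem.Dict.mk (pvDiff ps cs)) else p) x) = _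
            rw [hfx, pvG_congr_of_ne tl dom ps x hxs]
        · apply List.filterMap_congr
          intro x hx
          apply pvH_congr
          rw [PySem.Dict.contains_insert]
          have hxs : (x.1 == dom) = false := by
            have hne : x.1 ≠ dom := by
              intro he
              exact hdomtl (he ▸ pvKeyMem tl x hx)
            simpa using hne
          rw [hxs]
          simp
    | none =>
      have hc : C.contains dom = false := (PySem.Dict.get?_eq_none_iff_contains C dom).mp hcg
      have hstep : pvAstepFn C (dom, ps) =
          (if ps.items.isEmpty then C
           else C.insert dom (PySem.Dict.mk (ps.items.map (fun p => (p.1, ("" : String)))))) := by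
        unfold pvAstepFn
        simp only [PySem.Dict.setdefault_of_not_contains C _ hc]
        have hgetD : (C.insert dom PySem.Dict.empty).getD dom PySem.Dict.empty = PySem.Dict.empty := by
          simp [PySem.Dict.getD, PySem.Dict.get?_insert_self]
        rw [hgetD, pvA_inner ps.items PySem.Dict.empty hpsn (by simp [PySem.Dict.keys_empty])]
        have hdi : pvDiff (PySem.Dict.mk ps.items) PySem.Dict.empty = ps.items.map (fun p => (p.1, ("" : String))) := by
          unfold pvDiff
          simp [PySem.Dict.empty]
        rw [hdi, PySem.Dict.insert_insert_self]
        have hsz : ((PySem.Dict.mk (ps.items.map (fun p => (p.1, ("" : String))))).size == 0) = ps.items.isEmpty := by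
          show ((ps.items.map (fun p => (p.1, ("" : String)))).length == 0) = ps.items.isEmpty
          cases ps.items <;> rfl
        rw [hsz]
        by_cases hz : ps.items.isEmpty = true
        · rw [if_pos hz, if_pos hz, pvInsert_erase, pvErase_of_not_contains C dom hc]
        · rw [if_neg hz, if_neg hz]
      rw [hstep]
      by_cases hz : ps.items.isEmpty = true
      · rw [if_pos hz]
        rw [ih C htl hplv' hC hCv]
        have hHd : pvH C (dom, ps) = none := by
          unfold pvH
          rw [if_neg (by simp [List.isEmpty_iff.mp hz])]
        rw [List.filterMap_cons_none hHd]
        congr 1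
        apply List.filterMap_congr
        intro x hx
        exact (pvG_congr_of_ne tl dom ps x (pvNe_of_not_contains C dom hc x hx)).symm
      · rw [if_neg hz]
        have hdn : ((ps.items.map (fun p => (p.1, ("" : String)))).map (fun x => x.1)).Nodup := by
          rw [List.map_map]
          exact hpsn
        have hCv' : ∀ p ∈ (C.insert dom (PySem.Dict.mk (ps.items.map (fun p => (p.1, ("" : String)))))).items, p.2.keys.Nodup := by
          intro p hp
          rcases (PySem.Dict.mem_items_insert _ _ _ _).mp hp with h | ⟨h, _⟩
          · rw [h]
            show ((ps.items.map (fun p => (p.1, ("" : String)))).map (fun x => x.1)).Nodup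
            exact hdn
          · exact hCv p h
        rw [ih (C.insert dom (PySem.Dict.mk (ps.items.map (fun p => (p.1, ("" : String)))))) htl hplv'
            (PySem.Dict.nodup_keys_insert _ _ _ hC) hCv']
        rw [PySem.Dict.items_insert_of_not_contains C _ hc, List.filterMap_append]
        have hdel : pvH C (dom, ps) = some (dom, PySem.Dict.mk (ps.items.map (fun p => (p.1, ("" : String))))) := by
          unfold pvH
          rw [if_pos ⟨hc, by simpa [List.isEmpty_iff] using hz⟩]
        rw [List.filterMap_cons_some hdel]
        have hG1 : pvG (PySem.Dict.mk tl) (dom, PySem.Dict.mk (ps.items.map (fun p => (p.1, ("" : String))))) =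
            some (dom, PySem.Dict.mk (ps.items.map (fun p => (p.1, ("" : String))))) :=
          pvG_none (PySem.Dict.mk tl) _ (pvGet?_mk_eq_none tl dom hdomtl)
        rw [List.filterMap_cons_some hG1, List.filterMap_nil]
        have hGc : C.items.filterMap (pvG (PySem.Dict.mk tl)) = C.items.filterMap (pvG (PySem.Dict.mk ((dom, ps) :: tl))) := by
          apply List.filterMap_congr
          intro x hx
          exact (pvG_congr_of_ne tl dom ps x (pvNe_of_not_contains C dom hc x hx)).symm
        have hHc : tl.filterMap (pvH (C.insert dom (PySem.Dict.mk (ps.items.map (fun p => (p.1, ("" : String))))))) = tl.filterMap (pvH C) := by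
          apply List.filterMap_congr
          intro x hx
          apply pvH_congr
          rw [PySem.Dict.contains_insert]
          have hxs : (x.1 == dom) = false := by
            have hne : x.1 ≠ dom := by
              intro he
              exact hdomtl (he ▸ pvKeyMem tl x hx)
            simpa using hne
          rw [hxs]
          simp
        rw [hGc, hHc]
        simp [List.append_assoc]

-- a fold of conditional inserts of fresh keys appends its kept pairs
lemma pvFoldl_insertOpt {A B : Type} (l : List (String × A)) (F : String × A → Option (String × B)) (u : PySem.Dict String B)
    (hkey : ∀ x y, F x = some y → y.1 = x.1)
    (hn : (l.map (fun p => p.1)).Nodup)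
    (hfresh : ∀ x ∈ l, (F x).isSome → u.contains x.1 = false) :
    (l.foldl (pvIns F) u).items = u.items ++ l.filterMap F := by
  induction l generalizing u with
  | nil => simp
  | cons x tl ih =>
    rw [List.map_cons, List.nodup_cons] at hn
    obtain ⟨hx, htl⟩ := hn
    rw [List.foldl_cons]
    cases hF : F x with
    | none =>
      have hR : pvIns F u x = u := by unfold pvIns; rw [hF]
      rw [hR, List.filterMap_cons_none hF]
      exact ih u htl (fun z hz hs => hfresh z (List.mem_cons_of_mem _ hz) hs)
    | some y =>
      have hy1 : y.1 = x.1 := hkey x y hF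
      have hR : pvIns F u x = u.insert y.1 y.2 := by unfold pvIns; rw [hF]
      have hfr : u.contains y.1 = false := by
        rw [hy1]
        exact hfresh x List.mem_cons_self (by simp [hF])
      have hins : (u.insert y.1 y.2).items = u.items ++ [y] := by
        rw [PySem.Dict.items_insert_of_not_contains u y.2 hfr]
      have hfresh' : ∀ z ∈ tl, (F z).isSome → (u.insert y.1 y.2).contains z.1 = false := by
        intro z hz hs
        rw [PySem.Dict.contains_insert]
        have hzx : z.1 ≠ x.1 := by
          intro he
          exact hx (he ▸ pvKeyMem tl z hz)
        have h1 : (z.1 == y.1) = false := by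
          rw [hy1]; simpa using hzx
        rw [h1, hfresh z (List.mem_cons_of_mem _ hz) hs]
        rfl
      rw [hR, ih (u.insert y.1 y.2) htl hfresh', hins, List.filterMap_cons_some hF]
      simp [List.append_assoc]

-- B's first pass computes the filterMap of pvG
lemma pvB_first (cl : List (String × PySem.Dict String String)) (P : PySem.Dict String (PySem.Dict String String))
    (hcl : (cl.map (fun p => p.1)).Nodup) (hclv : ∀ p ∈ cl, p.2.keys.Nodup)
    (hP : P.keys.Nodup) (hPv : ∀ p ∈ P.items, p.2.keys.Nodup) :
    (cl.foldl (pvBstep1 P) PySem.Dict.empty).items = cl.filterMap (pvG P) := by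
  clear hP
  have hcong : ∀ (upd : PySem.Dict String (PySem.Dict String String)), ∀ dc ∈ cl,
      pvBstep1 P upd dc = pvIns (pvG P) upd dc := by
    intro upd dc hdc
    cases hg : P.get? dc.1 with
    | none =>
      have hL : pvBstep1 P upd dc = upd.insert dc.1 dc.2 := by
        unfold pvBstep1; rw [hg]
      have hGv : pvG P dc = some dc := by
        unfold pvG; rw [hg]
      have hR : pvIns (pvG P) upd dc = upd.insert dc.1 dc.2 := by
        unfold pvIns; rw [hGv]
      rw [hL, hR]
    | some ps =>
      have hps : ps.keys.Nodup := hPv _ (PySem.Dict.mem_items_of_get?_eq_some P hg)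
      have hcs : dc.2.keys.Nodup := hclv _ hdc
      have h1 : dc.2.items.foldl (fun d sv =>
            if !(ps.get? sv.1 == some sv.2) then d.insert sv.1 sv.2 else d) PySem.Dict.empty
          = PySem.Dict.mk (dc.2.items.filter (fun sv => !(ps.get? sv.1 == some sv.2))) := by
        rw [PySem.List.foldl_if_eq_foldl_filter]
        apply PySem.Dict.ext
        rw [PySem.Dict.items_foldl_insert_fresh _ (fun (a : String × String) => a.1) (fun a => a.2) _
            (by intro a _; simp [PySem.Dict.contains_empty])
            ((List.filter_sublist.map _).nodup hcs)]
        simp [PySem.Dict.empty]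
      have h2 : ps.items.foldl (fun d p =>
            if dc.2.contains p.1 = false then d.insert p.1 "" else d)
            (PySem.Dict.mk (dc.2.items.filter (fun sv => !(ps.get? sv.1 == some sv.2))))
          = PySem.Dict.mk (pvDiff ps dc.2) := by
        rw [PySem.List.foldl_ite_eq_foldl_filter]
        apply PySem.Dict.ext
        have hfil : ps.items.filter (fun x => decide (dc.2.contains x.1 = false))
            = ps.items.filter (fun p => !(dc.2.contains p.1)) := by
          apply List.filter_congr
          intro x _
          cases hxx : dc.2.contains x.1 <;> simp_all
        rw [hfil]
        rw [PySem.Dict.items_foldl_insert_fresh _ (fun (a : String × String) => a.1) (fun _ => ("" : String)) _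
            ?hfr ((List.filter_sublist.map _).nodup hps)]
        · rfl
        case hfr =>
          intro a ha
          have hac : dc.2.contains a.1 = false := by simpa using (List.mem_filter.mp ha).2
          cases hcc : (PySem.Dict.mk (dc.2.items.filter (fun sv => !(ps.get? sv.1 == some sv.2)))).contains a.1
          · rfl
          · exfalso
            rw [PySem.Dict.contains_mk, List.any_eq_true] at hcc
            obtain ⟨q, hq, hqa⟩ := hcc
            have hq1 : q.1 = a.1 := by simpa using hqa
            have hca : dc.2.contains a.1 = true := by
              have hcm := pvContains_of_mem dc.2 q (List.mem_of_mem_filter hq)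
              rwa [hq1] at hcm
            rw [hca] at hac
            exact Bool.noConfusion hac
      have hL : pvBstep1 P upd dc =
          (if (pvDiff ps dc.2).isEmpty then upd else upd.insert dc.1 (PySem.Dict.mk (pvDiff ps dc.2))) := by
        unfold pvBstep1
        rw [hg]
        show (let diff := dc.2.items.foldl (fun d sv =>
            if !(ps.get? sv.1 == some sv.2) then d.insert sv.1 sv.2 else d) PySem.Dict.empty
          let diff := ps.items.foldl (fun d p =>
            if dc.2.contains p.1 = false then d.insert p.1 "" else d) diff
          if diff.size == 0 then upd else upd.insert dc.1 diff) = _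
        simp only [h1, h2]
        have hsz : ((PySem.Dict.mk (pvDiff ps dc.2)).size == 0) = (pvDiff ps dc.2).isEmpty := by
          show ((pvDiff ps dc.2).length == 0) = (pvDiff ps dc.2).isEmpty
          cases pvDiff ps dc.2 <;> rfl
        rw [hsz]
      have hGv : pvG P dc = (if (pvDiff ps dc.2).isEmpty then none else some (dc.1, PySem.Dict.mk (pvDiff ps dc.2))) := by
        unfold pvG; rw [hg]
      rw [hL]
      by_cases hz : (pvDiff ps dc.2).isEmpty = true
      · have hR : pvIns (pvG P) upd dc = upd := by
          unfold pvIns; rw [hGv, if_pos hz]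
        rw [hR, if_pos hz]
      · have hR : pvIns (pvG P) upd dc = upd.insert dc.1 (PySem.Dict.mk (pvDiff ps dc.2)) := by
          unfold pvIns; rw [hGv, if_neg hz]
        rw [hR, if_neg hz]
  rw [PySem.List.foldl_congr_mem cl (pvBstep1 P) (pvIns (pvG P)) PySem.Dict.empty hcong]
  rw [pvFoldl_insertOpt cl (pvG P) PySem.Dict.empty (pvG_key P) hcl
      (by intro x _ _; simp [PySem.Dict.contains_empty])]
  simp [PySem.Dict.empty]

-- B's second pass appends the filterMap of pvH
lemma pvB_second (pl : List (String × PySem.Dict String String)) (C u : PySem.Dict String (PySem.Dict String String))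
    (hpl : (pl.map (fun p => p.1)).Nodup) (hplv : ∀ p ∈ pl, p.2.keys.Nodup)
    (hufresh : ∀ x ∈ pl, C.contains x.1 = false → u.contains x.1 = false) :
    (pl.foldl (fun upd (dp : String × PySem.Dict String String) =>
      if dp.2.size ≠ 0 ∧ C.contains dp.1 = false then
        upd.insert dp.1 (dp.2.items.foldl (fun d p => d.insert p.1 "") PySem.Dict.empty)
      else upd) u).items
    = u.items ++ pl.filterMap (pvH C) := by
  have hcong : ∀ (upd : PySem.Dict String (PySem.Dict String String)), ∀ dp ∈ pl,
      (if dp.2.size ≠ 0 ∧ C.contains dp.1 = false then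
        upd.insert dp.1 (dp.2.items.foldl (fun d p => d.insert p.1 "") PySem.Dict.empty)
      else upd) = pvIns (pvH C) upd dp := by
    intro upd dp hdp
    have hcompr : dp.2.items.foldl (fun d p => d.insert p.1 "") PySem.Dict.empty
        = PySem.Dict.mk (dp.2.items.map (fun p => (p.1, ("" : String)))) := by
      apply PySem.Dict.ext
      rw [PySem.Dict.items_foldl_insert_fresh _ (fun (a : String × String) => a.1) (fun _ => ("" : String)) _
          (by intro a _; simp [PySem.Dict.contains_empty]) (hplv _ hdp)]
      rfl
    by_cases hcnd : C.contains dp.1 = false ∧ dp.2.items ≠ []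
    · have hH : pvH C dp = some (dp.1, PySem.Dict.mk (dp.2.items.map (fun p => (p.1, ("" : String))))) := by
        unfold pvH; rw [if_pos hcnd]
      have hR : pvIns (pvH C) upd dp = upd.insert dp.1 (PySem.Dict.mk (dp.2.items.map (fun p => (p.1, ("" : String))))) := by
        unfold pvIns; rw [hH]
      rw [hR, if_pos ⟨by
          show dp.2.items.length ≠ 0
          intro he
          exact hcnd.2 (List.length_eq_zero_iff.mp he), hcnd.1⟩, hcompr]
    · have hH : pvH C dp = none := by
        unfold pvH; rw [if_neg hcnd]
      have hR : pvIns (pvH C) upd dp = upd := by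
        unfold pvIns; rw [hH]
      rw [hR, if_neg (by
        rintro ⟨h1, h2⟩
        exact hcnd ⟨h2, fun he => h1 (by show dp.2.items.length = 0; rw [he]; rfl)⟩)]
  rw [PySem.List.foldl_congr_mem pl _ (pvIns (pvH C)) u hcong]
  exact pvFoldl_insertOpt pl (pvH C) u (pvH_key C) hpl
    (fun x hx hs => by
      apply hufresh x hx
      cases hcc : C.contains x.1 with
      | false => rfl
      | true =>
        exfalso
        unfold pvH at hs
        rw [if_neg (by rintro ⟨h1, _⟩; rw [hcc] at h1; exact Bool.noConfusion h1)] at hs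
        simp at hs)

-- the two programs, characterised side by side
lemma pvMain (pl cl : List (String × PySem.Dict String String))
    (hpl : (pl.map (fun p => p.1)).Nodup) (hplv : ∀ p ∈ pl, p.2.keys.Nodup)
    (hcl : (cl.map (fun p => p.1)).Nodup) (hclv : ∀ p ∈ cl, p.2.keys.Nodup) :
    (pl.foldl pvAstepFn (PySem.Dict.mk cl)).items.map (fun p => (p.1, p.2.items))
    = ((pl.foldl (fun upd (dp : String × PySem.Dict String String) =>
        if dp.2.size ≠ 0 ∧ (PySem.Dict.mk cl).contains dp.1 = false then
          upd.insert dp.1 (dp.2.items.foldl (fun d p => d.insert p.1 "") PySem.Dict.empty)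
        else upd) (cl.foldl (pvBstep1 (PySem.Dict.mk pl)) PySem.Dict.empty))).items.map (fun p => (p.1, p.2.items)) := by
  have hclv' : ∀ p ∈ (PySem.Dict.mk cl).items, p.2.keys.Nodup := hclv
  have hPv : ∀ p ∈ (PySem.Dict.mk pl).items, p.2.keys.Nodup := hplv
  rw [pvA_outer pl (PySem.Dict.mk cl) hpl hplv (pvKeysNodup_mk cl hcl) hclv']
  rw [pvB_second pl (PySem.Dict.mk cl) _ hpl hplv ?huf]
  case huf =>
    intro x hx hcx
    cases hcc : (cl.foldl (pvBstep1 (PySem.Dict.mk pl)) PySem.Dict.empty).contains x.1 with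
    | false => rfl
    | true =>
      exfalso
      have hex : ∃ y ∈ (cl.foldl (pvBstep1 (PySem.Dict.mk pl)) PySem.Dict.empty).items, (y.1 == x.1) = true := by
        simpa [PySem.Dict.contains, List.any_eq_true] using hcc
      obtain ⟨y, hy, hyx⟩ := hex
      rw [pvB_first cl (PySem.Dict.mk pl) hcl hclv (pvKeysNodup_mk pl hpl) hPv] at hy
      obtain ⟨z, hz, hze⟩ := List.mem_filterMap.mp hy
      have hzy : y.1 = z.1 := pvG_key _ z y hze
      have hxz : z.1 = x.1 := by rw [← hzy]; simpa using hyx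
      have hct : (PySem.Dict.mk cl).contains x.1 = true := by
        rw [PySem.Dict.contains_mk, List.any_eq_true]
        exact ⟨z, hz, by simp [hxz]⟩
      rw [hct] at hcx
      exact Bool.noConfusion hcx
  rw [pvB_first cl (PySem.Dict.mk pl) hcl hclv (pvKeysNodup_mk pl hpl) hPv]

-- ===== VERDICT (by name: the statement is the Claim_ definition above) =====
theorem get_state_update_spec : Claim_equal_get_state_update := by
  unfold Claim_equal_get_state_update
  intro prev cur _ hpre
  obtain ⟨⟨hp1, hp2⟩, hc1, hc2⟩ := hpre
  unfold Spec_get_state_update get_state_update get_state_update_alt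
  simp only []
  have hfn : (fun (state : PySem.Dict String (PySem.Dict String String)) (dp : String × PySem.Dict String String) =>
      let state := state.setdefault dp.1 PySem.Dict.empty
      let d := dp.2.items.foldl (fun d sp =>
        if d.contains sp.1 = false then d.insert sp.1 ""
        else if d.get? sp.1 == some sp.2 then d.erase sp.1
        else d) (state.getD dp.1 PySem.Dict.empty)
      let state := state.insert dp.1 d
      if d.size == 0 then state.erase dp.1 else state) = pvAstepFn := rfl
  rw [hfn]
  refine pvMain (prev.map (fun p => (p.1, PySem.Dict.mk p.2))) (cur.map (fun p => (p.1, PySem.Dict.mk p.2))) ?_ ?_ ?_ ?_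
  · rw [List.map_map]
    exact hp1
  · intro p hp
    obtain ⟨q, hq, hqe⟩ := List.mem_map.mp hp
    rw [← hqe]
    show ((q.2.map (fun x => x.1))).Nodup
    exact hp2 q hq
  · rw [List.map_map]
    exact hc1
  · intro p hp
    obtain ⟨q, hq, hqe⟩ := List.mem_map.mp hp
    rw [← hqe]
    show ((q.2.map (fun x => x.1))).Nodup
    exact hc2 q hq
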